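-- pv_equiv track=rewrite | github.com/jfgoodall/advent-of-code | 2023/py/day22.py | disintegratable_blocks
-- ===== SOURCE A (Python) =====
-- def disintegratable_blocks(blocks, supports, supported_by):
--     # count disintegratable blocks
--     disintegratable = set()
--     for block_id in blocks:
--         for overhead in supports[block_id]:
--             if not (supported_by[overhead] - {block_id}):
--                 break
--         else:
--             disintegratable.add(block_id)
--     return disintegratable
-- ===== SOURCE B (Python) =====
-- def disintegratable_blocks(blocks, supports, supported_by):
--     # Staged inverted decomposition: first build an index listed_by mapping each
--     # overhead to the set of blocks that list it, then classify each listed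
--     # overhead from supported_by (no supporters / exactly one supporter) to
--     # accumulate an `unsafe` set, and return set(blocks) - unsafe.
--     listed_by = {}
--     for b in blocks:
--         for o in supports[b]:
--             listed_by.setdefault(o, set()).add(b)
--     unsafe = set()
--     for o, claimants in listed_by.items():
--         sups = supported_by[o]
--         if not sups:
--             unsafe |= claimants
--         elif len(sups) == 1:
--             (s,) = sups
--             if s in claimants:
--                 unsafe.add(s)
--     return set(blocks) - unsafe
-- ===== Notes on version B (the rewrite author's own statement) =====
-- stated objective: alternative
-- what changed: A is block-major: for each block it scans its overheads with a break/else loop doing a set difference per overhead; B first inverts supports into an index listed_by (overhead -> blocks listing it), then makes one pass over that index classifying each overhead (no supporters / sole supporter) to accumulate an `unsafe` set, and returns set(blocks) - unsafe.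
-- outside the precondition, e.g. on disintegratable_blocks([0], {0: {1, 2}}, {1: {0}}): A returns set(), B raises KeyError
import Mathlib
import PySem

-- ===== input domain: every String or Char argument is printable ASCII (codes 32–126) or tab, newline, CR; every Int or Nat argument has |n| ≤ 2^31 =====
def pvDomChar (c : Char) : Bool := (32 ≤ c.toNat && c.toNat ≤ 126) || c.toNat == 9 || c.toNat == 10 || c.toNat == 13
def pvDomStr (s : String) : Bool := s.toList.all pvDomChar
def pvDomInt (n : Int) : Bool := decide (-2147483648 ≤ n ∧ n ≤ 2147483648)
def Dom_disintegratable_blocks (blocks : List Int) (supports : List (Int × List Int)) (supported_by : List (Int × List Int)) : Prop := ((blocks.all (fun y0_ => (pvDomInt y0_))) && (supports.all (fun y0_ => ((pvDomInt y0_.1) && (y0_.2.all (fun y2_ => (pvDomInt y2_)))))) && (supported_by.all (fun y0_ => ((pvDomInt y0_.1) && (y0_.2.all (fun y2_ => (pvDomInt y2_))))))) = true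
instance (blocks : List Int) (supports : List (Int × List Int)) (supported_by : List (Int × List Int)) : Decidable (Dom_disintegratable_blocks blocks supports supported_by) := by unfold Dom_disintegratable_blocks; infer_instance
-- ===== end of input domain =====

-- B replaces A's block-major break/else scan by an overhead-major pass over supported_by that
-- accumulates an `unsafe` set, finishing with the complement set(blocks) - unsafe (objective: alternative).

-- ===== PORT A =====
-- the inner 'for overhead in supports[block_id]: … break / else' loop; `true` = the else branch ran
def pvAScan (block_id : Int) (supported_by : List (Int × List Int)) : List Int → Bool
  | [] => true
  | overhead :: rest =>
    if PySem.Set.diff (PySem.Dict.getD ⟨supported_by⟩ overhead []) [block_id] = [] then false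
    else pvAScan block_id supported_by rest

def disintegratable_blocks (blocks : List Int) (supports : List (Int × List Int)) (supported_by : List (Int × List Int)) : List Int :=
  blocks.foldl
    (fun dis b =>
      if pvAScan b supported_by (PySem.Dict.getD ⟨supports⟩ b []) then PySem.Set.add dis b else dis)
    PySem.Set.empty

-- ===== PORT B =====
-- the index-building stage: 'for b in blocks: for o in supports[b]: listed_by.setdefault(o, set()).add(b)'
def pvIndex (blocks : List Int) (supports : List (Int × List Int)) : PySem.Dict Int (PySem.Set Int) :=
  blocks.foldl
    (fun d b =>
      (PySem.Dict.getD (⟨supports⟩ : PySem.Dict Int (List Int)) b []).foldl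
        (fun d o => d.insert o (PySem.Set.add (d.getD o PySem.Set.empty) b)) d)
    PySem.Dict.empty

-- one iteration of Source B's 'for o, claimants in listed_by.items()' loop body
def pvBStep (supported_by : List (Int × List Int)) (acc : PySem.Set Int) (p : Int × PySem.Set Int) : PySem.Set Int :=
  let sups := PySem.Dict.getD (⟨supported_by⟩ : PySem.Dict Int (List Int)) p.1 []
  if sups = [] then PySem.Set.union acc p.2
  else if sups.length = 1 then
    if PySem.Set.contains p.2 sups.headI then PySem.Set.add acc sups.headI else acc
  else acc

def disintegratable_blocks_alt (blocks : List Int) (supports : List (Int × List Int)) (supported_by : List (Int × List Int)) : List Int :=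
  let listed_by := pvIndex blocks supports
  let critSet := listed_by.items.foldl (pvBStep supported_by) PySem.Set.empty
  PySem.Set.diff (PySem.Set.ofList blocks) critSet

-- ===== PRECONDITION & SPEC =====
-- supports/supported_by are Python dicts of SETS, so their values are duplicate-free;
-- beyond that, A raises KeyError when a block is missing from supports or a
-- scanned overhead is missing from supported_by.  Requiring EVERY overhead of supports[b] to be a
-- key of supported_by slightly over-excludes runs where A breaks before reaching a missing key
-- (A returns there, and B returns the same value — see the cite in claim.json).
def Pre_disintegratable_blocks (blocks : List Int) (supports : List (Int × List Int)) (supported_by : List (Int × List Int)) : Prop :=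
  (∀ p ∈ supported_by, p.2.Nodup) ∧
  ∀ b ∈ blocks,
    (PySem.Dict.get? (⟨supports⟩ : PySem.Dict Int (List Int)) b).isSome = true ∧
    ∀ o ∈ PySem.Dict.getD (⟨supports⟩ : PySem.Dict Int (List Int)) b [],
      (PySem.Dict.get? (⟨supported_by⟩ : PySem.Dict Int (List Int)) o).isSome = true
instance (blocks : List Int) (supports : List (Int × List Int)) (supported_by : List (Int × List Int)) : Decidable (Pre_disintegratable_blocks blocks supports supported_by) := by unfold Pre_disintegratable_blocks; infer_instance

def pvWitness_disintegratable_blocks : List Int × (List (Int × List Int)) × (List (Int × List Int)) :=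
  ([1, 2], [(1, [2]), (2, [])], [(1, []), (2, [1])])

def Spec_disintegratable_blocks (blocks : List Int) (supports : List (Int × List Int)) (supported_by : List (Int × List Int)) (out : List Int) : Prop := out = disintegratable_blocks_alt blocks supports supported_by
instance (blocks : List Int) (supports : List (Int × List Int)) (supported_by : List (Int × List Int)) (out : List Int) : Decidable (Spec_disintegratable_blocks blocks supports supported_by out) := by unfold Spec_disintegratable_blocks; infer_instance

-- ===== CLAIM (what is proved, stated in full; the proofs are below) =====
def Claim_equal_disintegratable_blocks : Prop := ∀ (blocks : List Int) (supports : List (Int × List Int)) (supported_by : List (Int × List Int)), Dom_disintegratable_blocks blocks supports supported_by → Pre_disintegratable_blocks blocks supports supported_by → Spec_disintegratable_blocks blocks supports supported_by (disintegratable_blocks blocks supports supported_by)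

-- ===== LEMMAS AND PROOFS =====

-- what the inner index loop (over supports[b]) records
theorem pv_mem_inner (b : Int) (os : List Int) (d : PySem.Dict Int (PySem.Set Int)) (o x : Int) :
    x ∈ (os.foldl (fun d o => d.insert o (PySem.Set.add (d.getD o PySem.Set.empty) b)) d).getD o PySem.Set.empty ↔
      x ∈ d.getD o PySem.Set.empty ∨ (o ∈ os ∧ x = b) := by
  induction os generalizing d with
  | nil => simp
  | cons hd tl ih =>
    simp only [List.foldl_cons, ih, PySem.Dict.getD_insert]
    by_cases ho : o = hd
    · subst ho
      simp [PySem.Set.mem_add _ _ _]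
      tauto
    · simp [ho]

-- what the whole index records: x is a claimant of o iff x is a block listing o
theorem pv_mem_index_aux (supports : List (Int × List Int)) (bs : List Int)
    (d : PySem.Dict Int (PySem.Set Int)) (o x : Int) :
    x ∈ (bs.foldl
        (fun d b => (PySem.Dict.getD (⟨supports⟩ : PySem.Dict Int (List Int)) b []).foldl
          (fun d o => d.insert o (PySem.Set.add (d.getD o PySem.Set.empty) b)) d) d).getD o PySem.Set.empty ↔
      x ∈ d.getD o PySem.Set.empty ∨
        (x ∈ bs ∧ o ∈ PySem.Dict.getD (⟨supports⟩ : PySem.Dict Int (List Int)) x []) := by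
  induction bs generalizing d with
  | nil => simp
  | cons hd tl ih =>
    simp only [List.foldl_cons, ih, pv_mem_inner]
    constructor
    · rintro ((hm | ⟨ho, hx⟩) | h)
      · exact Or.inl hm
      · exact Or.inr ⟨by simp [hx], by simpa [hx] using ho⟩
      · exact Or.inr ⟨List.mem_cons_of_mem _ h.1, h.2⟩
    · rintro (hm | ⟨hmem, ho⟩)
      · exact Or.inl (Or.inl hm)
      · rcases List.mem_cons.mp hmem with h | h
        · exact Or.inl (Or.inr ⟨by simpa [h] using ho, h⟩)
        · exact Or.inr ⟨h, ho⟩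

theorem pv_mem_index (blocks : List Int) (supports : List (Int × List Int)) (o x : Int) :
    x ∈ (pvIndex blocks supports).getD o PySem.Set.empty ↔
      x ∈ blocks ∧ o ∈ PySem.Dict.getD (⟨supports⟩ : PySem.Dict Int (List Int)) x [] := by
  unfold pvIndex
  rw [pv_mem_index_aux]
  simp [PySem.Dict.getD_empty]

-- the index's keys stay duplicate-free through both insert loops
theorem pv_nodup_keys_inner (b : Int) (os : List Int) (d : PySem.Dict Int (PySem.Set Int))
    (h : (PySem.Dict.keys d).Nodup) :
    (PySem.Dict.keys (os.foldl (fun d o => d.insert o (PySem.Set.add (d.getD o PySem.Set.empty) b)) d)).Nodup := by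
  induction os generalizing d with
  | nil => exact h
  | cons hd tl ih => exact ih _ (PySem.Dict.nodup_keys_insert _ _ _ h)

theorem pv_nodup_keys_index (blocks : List Int) (supports : List (Int × List Int)) :
    (PySem.Dict.keys (pvIndex blocks supports)).Nodup := by
  unfold pvIndex
  generalize hd : (PySem.Dict.empty : PySem.Dict Int (PySem.Set Int)) = d0
  have h0 : (PySem.Dict.keys d0).Nodup := by rw [← hd]; exact PySem.Dict.nodup_keys_empty
  clear hd
  induction blocks generalizing d0 with
  | nil => exact h0
  | cons hd tl ih => exact ih _ (pv_nodup_keys_inner _ _ _ h0)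

-- what one classification step contributes to `unsafe`
def pvQ (supported_by : List (Int × List Int)) (p : Int × PySem.Set Int) (x : Int) : Prop :=
  x ∈ p.2 ∧
    (PySem.Dict.getD (⟨supported_by⟩ : PySem.Dict Int (List Int)) p.1 [] = [] ∨
     PySem.Dict.getD (⟨supported_by⟩ : PySem.Dict Int (List Int)) p.1 [] = [x])

theorem pv_mem_step (supported_by : List (Int × List Int))
    (u : PySem.Set Int) (p : Int × PySem.Set Int) (x : Int) :
    x ∈ pvBStep supported_by u p ↔ x ∈ u ∨ pvQ supported_by p x := by
  unfold pvBStep pvQ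
  set sups := PySem.Dict.getD (⟨supported_by⟩ : PySem.Dict Int (List Int)) p.1 [] with hsups
  by_cases h0 : sups = []
  · rw [if_pos h0]
    simp only [PySem.Set.mem_union]
    tauto
  · rw [if_neg h0]
    by_cases h1 : sups.length = 1
    · rw [if_pos h1]
      obtain ⟨a, ha⟩ : ∃ a, sups = [a] := List.length_eq_one_iff.mp h1
      by_cases hc : PySem.Set.contains p.2 sups.headI = true
      · rw [if_pos hc]
        have hmem : sups.headI ∈ p.2 := (PySem.Set.contains_iff _ _).mp hc
        rw [PySem.Set.mem_add _ _ _]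
        constructor
        · rintro (hm | hx)
          · exact Or.inl hm
          · exact Or.inr ⟨by simpa [hx] using hmem, Or.inr (by subst hx; simp [ha, List.headI])⟩
        · rintro (hm | ⟨hp2, hform⟩)
          · exact Or.inl hm
          · rcases hform with h | h
            · exact absurd h h0
            · exact Or.inr (by simp [ha] at h; simp [ha, List.headI, h])
      · rw [if_neg hc]
        constructor
        · exact Or.inl
        · rintro (hm | ⟨hp2, hform⟩)
          · exact hm
          · rcases hform with h | h
            · exact absurd h h0
            · exact absurd ((PySem.Set.contains_iff _ _).mpr
                (by simp [ha] at h; simpa [ha, List.headI, h] using hp2)) hc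
    · rw [if_neg h1]
      constructor
      · exact Or.inl
      · rintro (hm | ⟨hp2, hform⟩)
        · exact hm
        · rcases hform with h | h
          · exact absurd h h0
          · exact absurd (by simp [h] : sups.length = 1) h1

-- membership in the whole `unsafe` accumulator
theorem pv_mem_unsafe (supported_by : List (Int × List Int))
    (items : List (Int × PySem.Set Int)) (u : PySem.Set Int) (x : Int) :
    x ∈ items.foldl (pvBStep supported_by) u ↔
      x ∈ u ∨ ∃ p ∈ items, pvQ supported_by p x := by
  induction items generalizing u with
  | nil => simp
  | cons hd tl ih =>
    simp only [List.foldl_cons, ih, pv_mem_step]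
    constructor
    · rintro ((hm | hq) | ⟨p, hp, hq⟩)
      · exact Or.inl hm
      · exact Or.inr ⟨hd, by simp, hq⟩
      · exact Or.inr ⟨p, by simp [hp], hq⟩
    · rintro (hm | ⟨p, hp, hq⟩)
      · exact Or.inl (Or.inl hm)
      · rcases List.mem_cons.mp hp with h | h
        · exact Or.inl (Or.inr (h ▸ hq))
        · exact Or.inr ⟨p, h, hq⟩

-- the break/else scan is the negation of an 'any' over the same elements
theorem pv_scan_eq_not_any (b : Int) (sb : List (Int × List Int)) (os : List Int) :
    pvAScan b sb os
      = !(os.any (fun o => decide (PySem.Set.diff (PySem.Dict.getD (⟨sb⟩ : PySem.Dict Int (List Int)) o []) [b] = []))) := by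
  induction os with
  | nil => rfl
  | cons o rest ih =>
    simp only [pvAScan, List.any_cons]
    by_cases hc : PySem.Set.diff (PySem.Dict.getD (⟨sb⟩ : PySem.Dict Int (List Int)) o []) [b] = []
    · simp [hc]
    · simp [hc, ih]

-- on a duplicate-free list, 'diff s [b] = []' says s = [] or s = [b]
theorem pv_diff_singleton_empty (s : List Int) (hs : s.Nodup) (b : Int) :
    PySem.Set.diff s [b] = [] ↔ s = [] ∨ s = [b] := by
  constructor
  · intro h
    match s, hs with
    | [], _ => exact Or.inl rfl
    | [x], _ =>
      by_cases hxb : x = b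
      · exact Or.inr (by simp [hxb])
      · exfalso; simp [PySem.Set.diff, List.filter, hxb] at h
    | x :: y :: ys, hs =>
      exfalso
      have hxy : x ≠ y := by simp [List.nodup_cons] at hs; tauto
      simp only [PySem.Set.diff, List.filter_eq_nil_iff] at h
      have hx := h x (by simp)
      have hy := h y (by simp)
      simp at hx hy
      exact hxy (hx.trans hy.symm)
  · rintro (h | h) <;> simp [h, PySem.Set.diff]

-- bridge between A's per-block test and B's per-overhead classification, for b ∈ blocks
theorem pv_exists_agree (b : Int) (blocks : List Int) (supports supported_by : List (Int × List Int))
    (hb : b ∈ blocks)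
    (hvals : ∀ p ∈ supported_by, p.2.Nodup)
    (hos : ∀ o ∈ PySem.Dict.getD (⟨supports⟩ : PySem.Dict Int (List Int)) b [],
      (PySem.Dict.get? (⟨supported_by⟩ : PySem.Dict Int (List Int)) o).isSome = true) :
    ((∃ p ∈ (pvIndex blocks supports).items, pvQ supported_by p b) ↔
      ∃ o ∈ PySem.Dict.getD (⟨supports⟩ : PySem.Dict Int (List Int)) b [],
        PySem.Set.diff (PySem.Dict.getD (⟨supported_by⟩ : PySem.Dict Int (List Int)) o []) [b] = []) := by
  constructor
  · rintro ⟨⟨o, cl⟩, hp, hbcl, hform⟩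
    have hgetD : (pvIndex blocks supports).getD o PySem.Set.empty = cl :=
      PySem.Dict.getD_of_mem_items (d := pvIndex blocks supports) hp (pv_nodup_keys_index blocks supports) _
    have hidx : b ∈ blocks ∧ o ∈ PySem.Dict.getD (⟨supports⟩ : PySem.Dict Int (List Int)) b [] :=
      (pv_mem_index blocks supports o b).mp (by rw [hgetD]; exact hbcl)
    refine ⟨o, hidx.2, ?_⟩
    rcases hform with h | h <;> simp [h, PySem.Set.diff]
  · rintro ⟨o, ho, hdiff⟩
    obtain ⟨s, hget⟩ := Option.isSome_iff_exists.mp (hos o ho)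
    have hpmem : (o, s) ∈ supported_by :=
      PySem.Dict.mem_items_of_get?_eq_some (d := ⟨supported_by⟩) hget
    have hgetD : PySem.Dict.getD (⟨supported_by⟩ : PySem.Dict Int (List Int)) o [] = s := by
      simp [PySem.Dict.getD_eq_get?_getD, hget]
    have hbcl : b ∈ (pvIndex blocks supports).getD o PySem.Set.empty :=
      (pv_mem_index blocks supports o b).mpr ⟨hb, ho⟩
    have hne : (pvIndex blocks supports).getD o PySem.Set.empty ≠ [] := by
      intro h; rw [h] at hbcl; cases hbcl
    obtain ⟨cl, hcl⟩ : ∃ cl, (pvIndex blocks supports).get? o = some cl := by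
      cases hq : (pvIndex blocks supports).get? o with
      | none => exact absurd (by simp [PySem.Dict.getD_eq_get?_getD, hq]) hne
      | some cl => exact ⟨cl, rfl⟩
    have hitems : (o, cl) ∈ (pvIndex blocks supports).items :=
      PySem.Dict.mem_items_of_get?_eq_some (d := pvIndex blocks supports) hcl
    have hcleq : (pvIndex blocks supports).getD o PySem.Set.empty = cl := by
      simp [PySem.Dict.getD_eq_get?_getD, hcl]
    refine ⟨(o, cl), hitems, by rw [← hcleq]; exact hbcl, ?_⟩
    rw [hgetD] at hdiff ⊢
    simpa using (pv_diff_singleton_empty s (hvals _ hpmem) b).mp hdiff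

-- a conditional Set.add fold from empty is a filter of the deduplicated list
theorem pv_foldl_add_if_eq_filter (p : Int → Bool) (l : List Int) :
    l.foldl (fun s b => if p b then PySem.Set.add s b else s) PySem.Set.empty
      = (PySem.Set.ofList l).filter p := by
  induction l using List.reverseRecOn with
  | nil => rfl
  | append_singleton xs x ih =>
    rw [List.foldl_append, PySem.Set.ofList_append_singleton]
    simp only [List.foldl, ih]
    by_cases hx : x ∈ PySem.Set.ofList xs
    · rw [PySem.Set.add_of_mem hx]
      by_cases hp : p x = true
      · rw [if_pos hp, PySem.Set.add_of_mem (by simp [List.mem_filter, hx, hp])]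
      · simp [hp]
    · rw [PySem.Set.add_of_not_mem hx, List.filter_append]
      by_cases hp : p x = true
      · rw [if_pos hp, PySem.Set.add_of_not_mem (fun hmem => hx (List.mem_of_mem_filter hmem))]
        simp [hp]
      · simp [hp]

-- ===== VERDICT (by name: the statement is the Claim_ definition above) =====
theorem disintegratable_blocks_spec : Claim_equal_disintegratable_blocks := by
  intro blocks supports supported_by _hdom hpre
  obtain ⟨hvals, hblocks⟩ := hpre
  unfold Spec_disintegratable_blocks disintegratable_blocks disintegratable_blocks_alt
  rw [pv_foldl_add_if_eq_filter]
  set U := (pvIndex blocks supports).items.foldl (pvBStep supported_by) PySem.Set.empty with hU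
  have hdiff : PySem.Set.diff (PySem.Set.ofList blocks) U
      = (PySem.Set.ofList blocks).filter (fun x => !(U.contains x)) := rfl
  rw [hdiff]
  apply List.filter_congr
  intro b hbmem'
  have hbmem : b ∈ blocks := (PySem.Set.mem_ofList blocks b).mp hbmem'
  have hmemU : b ∈ U ↔ ∃ p ∈ (pvIndex blocks supports).items, pvQ supported_by p b := by
    rw [hU, pv_mem_unsafe]
    simp [PySem.Set.empty]
  rw [pv_scan_eq_not_any]
  have hiff := pv_exists_agree b blocks supports supported_by hbmem hvals (hblocks b hbmem).2
  by_cases hin : b ∈ U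
  · have : ∃ o ∈ PySem.Dict.getD (⟨supports⟩ : PySem.Dict Int (List Int)) b [],
        PySem.Set.diff (PySem.Dict.getD (⟨supported_by⟩ : PySem.Dict Int (List Int)) o []) [b] = [] :=
      hiff.mp (hmemU.mp hin)
    have hany : (PySem.Dict.getD (⟨supports⟩ : PySem.Dict Int (List Int)) b []).any
        (fun o => decide (PySem.Set.diff (PySem.Dict.getD (⟨supported_by⟩ : PySem.Dict Int (List Int)) o []) [b] = [])) = true := by
      simpa [List.any_eq_true] using this
    have hcon : U.contains b = true := (PySem.Set.contains_iff _ _).mpr hin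
    rw [hany, hcon]
  · have hnoany : (PySem.Dict.getD (⟨supports⟩ : PySem.Dict Int (List Int)) b []).any
        (fun o => decide (PySem.Set.diff (PySem.Dict.getD (⟨supported_by⟩ : PySem.Dict Int (List Int)) o []) [b] = [])) = false := by
      rw [Bool.eq_false_iff]
      intro hany
      exact hin (hmemU.mpr (hiff.mpr (by simpa [List.any_eq_true] using hany)))
    have hcon : U.contains b = false := by
      rw [Bool.eq_false_iff]
      intro hc
      exact hin ((PySem.Set.contains_iff _ _).mp hc)
    rw [hnoany, hcon]
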